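-- pv_equiv track=rewrite | github.com/acm-uiuc/chroma-scripts | osc/config.py | maplights
-- ===== SOURCE A (Python) =====
-- order = [
--        37,       42,       46,
--   45,       40,       47,
--        36,       44,       38,
--   41,       43,       39,
--        34,        1,       35,
--
--   32,       30,       25,
--        22,       27,       24,
--   23,       18,       19,
--        16,       29,       31,
--   28,       26,       21,
--        20,       12,       33,
--
--    7,       14,        8,
--         2,       13,       15,
--    5,        0,       10,
--         3,       11,       17,
--    9,        4,        6,
-- ]
--
-- def maplights(array):
-- 	"""
-- 	Given a list of n tuples in the form of (R,G,B), return a list of the same size,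
-- 	corresponding to how they're arranged on the ceiling.
-- 	"""
-- 	out = [(0,0,0)]*len(order)
-- 	for i in range(len(order)):
-- 	  try:
-- 	    out[order[i]] = array[i]
-- 	  except IndexError:
-- 	    pass
--
-- 	return out
-- ===== SOURCE B (Python) =====
-- order = [
--        37,       42,       46,
--   45,       40,       47,
--        36,       44,       38,
--   41,       43,       39,
--        34,        1,       35,
--
--   32,       30,       25,
--        22,       27,       24,
--   23,       18,       19,
--        16,       29,       31,
--   28,       26,       21,
--        20,       12,       33,
--
--    7,       14,        8,
--         2,       13,       15,
--    5,        0,       10,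
--         3,       11,       17,
--    9,        4,        6,
-- ]
--
-- # inverse permutation: inv[j] is the unique source index i with order[i] == j
-- inv = {v: i for i, v in enumerate(order)}
--
-- def maplights(array):
--     """
--     Given a list of n tuples in the form of (R,G,B), return a list of the same size,
--     corresponding to how they're arranged on the ceiling.
--     """
--     # gather: pull each output slot from its source position instead of scattering
--     return [array[inv[j]] if inv[j] < len(array) else (0, 0, 0)
--             for j in range(len(order))]
-- ===== Notes on version B (the rewrite author's own statement) =====
-- stated objective: alternative
-- what changed: Replaces the scatter loop with try/except (writing array[i] into out[order[i]]) by a one-time inverse-permutation table and a gather comprehension that pulls out[j] = array[inv[j]] with an explicit length check.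
import Mathlib
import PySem

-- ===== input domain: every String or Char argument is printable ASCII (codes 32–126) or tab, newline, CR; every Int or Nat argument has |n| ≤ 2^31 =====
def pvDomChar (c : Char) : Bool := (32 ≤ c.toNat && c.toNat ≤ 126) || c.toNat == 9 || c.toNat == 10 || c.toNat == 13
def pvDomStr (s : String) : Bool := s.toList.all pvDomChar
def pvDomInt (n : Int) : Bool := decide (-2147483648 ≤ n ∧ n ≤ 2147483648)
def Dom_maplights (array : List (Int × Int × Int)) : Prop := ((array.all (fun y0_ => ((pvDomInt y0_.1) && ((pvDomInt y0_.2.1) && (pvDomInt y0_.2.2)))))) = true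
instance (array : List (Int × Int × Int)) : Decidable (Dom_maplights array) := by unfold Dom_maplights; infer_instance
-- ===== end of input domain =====

set_option maxRecDepth 4000


-- B replaces A's scatter loop (try/except around out[order[i]] = array[i]) by a gather
-- through a precomputed inverse-permutation table; same cost, different traversal.

-- the module-level `order` list (a permutation of 0..47)
def ordL : List Int := [
       37,       42,       46,
  45,       40,       47,
       36,       44,       38,
  41,       43,       39,
       34,        1,       35,

  32,       30,       25,
       22,       27,       24,
  23,       18,       19,
       16,       29,       31,
  28,       26,       21,
       20,       12,       33,

   7,       14,        8,
        2,       13,       15,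
   5,        0,       10,
        3,       11,       17,
   9,        4,        6]

-- ===== PORT A =====
-- out = [(0,0,0)]*len(order); for i in range(len(order)): try: out[order[i]] = array[i] except IndexError: pass
def maplights (array : List (Int × Int × Int)) : List (Int × Int × Int) :=
  (List.range ordL.length).foldl
    (fun out (i : Nat) =>
      match PySem.List.pyGet? array (i : Int) with   -- array[i]; IndexError → pass
      | some v => out.set (ordL.getD i 0).toNat v    -- out[order[i]] = array[i] (order[i] ∈ 0..47, always in range)
      | none => out)
    (List.replicate ordL.length ((0 : Int), (0 : Int), (0 : Int)))

-- ===== PORT B =====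
-- inv = {v: i for i, v in enumerate(order)}
def invD : PySem.Dict Int Int :=
  (PySem.List.enumerate ordL).foldl (fun d p => d.insert p.2 p.1) PySem.Dict.empty

-- [array[inv[j]] if inv[j] < len(array) else (0,0,0) for j in range(len(order))]
-- (the key j is always present in inv since order is a permutation of 0..47; getD's default is never used)
def maplights_alt (array : List (Int × Int × Int)) : List (Int × Int × Int) :=
  (List.range ordL.length).map (fun (j : Nat) =>
    let i := (invD.get? (j : Int)).getD 0
    if i < (array.length : Int) then array[i.toNat]! else ((0 : Int), (0 : Int), (0 : Int)))

-- ===== PRECONDITION & SPEC =====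
def Spec_maplights (array : List (Int × Int × Int)) (out : List (Int × Int × Int)) : Prop := out = maplights_alt array
instance (array : List (Int × Int × Int)) (out : List (Int × Int × Int)) : Decidable (Spec_maplights array out) := by unfold Spec_maplights; infer_instance

-- ===== CLAIM (what is proved, stated in full; the proofs are below) =====
def Claim_equal_maplights : Prop := ∀ (array : List (Int × Int × Int)), Dom_maplights array → Spec_maplights array (maplights array)

-- ===== LEMMAS AND PROOFS =====

def pvInv (j : Nat) : Int := (invD.get? (j : Int)).getD 0

def pvD : Int × Int × Int := ((0 : Int), (0 : Int), (0 : Int))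

-- state of A's out-array after the first k scatter iterations, written as a gather
def stateAt (array : List (Int × Int × Int)) (k : Nat) : List (Int × Int × Int) :=
  (List.range 48).map (fun j =>
    if (pvInv j).toNat < k ∧ pvInv j < (array.length : Int) then array[(pvInv j).toNat]! else pvD)

lemma pvF1 : ∀ i : Nat, i < 48 →
    0 ≤ ordL.getD i 0 ∧ (ordL.getD i 0).toNat < 48 ∧ pvInv (ordL.getD i 0).toNat = (i : Int) := by
  decide

lemma pvF2 : ∀ j : Nat, j < 48 →
    0 ≤ pvInv j ∧ (pvInv j).toNat < 48 ∧ ordL.getD (pvInv j).toNat 0 = (j : Int) := by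
  decide

lemma ordL_length : ordL.length = 48 := by decide

lemma step_stateAt (array : List (Int × Int × Int)) (k : Nat) (hk : k < 48) :
    (match PySem.List.pyGet? array (k : Int) with
     | some v => (stateAt array k).set (ordL.getD k 0).toNat v
     | none => stateAt array k) = stateAt array (k + 1) := by
  obtain ⟨hnn, hlt, hinv⟩ := pvF1 k hk
  cases h : PySem.List.pyGet? array (k : Int) with
  | some v =>
    have h' : array[k]? = some v := by rwa [PySem.List.pyGet?_natCast] at h
    have hklen : k < array.length := by
      rcases List.getElem?_eq_some_iff.mp h' with ⟨hh, _⟩; exact hh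
    have hv : v = array[k]! := by
      rcases List.getElem?_eq_some_iff.mp h' with ⟨hh, he⟩
      rw [getElem!_pos array k hh, he]
    apply List.ext_getElem
    · simp [stateAt]
    · intro j hj hj2
      have hj48 : j < 48 := by simpa [stateAt] using hj2
      simp only [stateAt]
      rw [List.getElem_set]
      by_cases hjp : (ordL.getD k 0).toNat = j
      · subst hjp
        rw [if_pos rfl]
        simp only [List.getElem_map, List.getElem_range]
        rw [hinv, if_pos ⟨by omega, by exact_mod_cast hklen⟩, Int.toNat_natCast, hv]
      · rw [if_neg hjp]
        simp only [List.getElem_map, List.getElem_range]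
        obtain ⟨hnn2, hlt2, hord2⟩ := pvF2 j hj48
        have hne : (pvInv j).toNat ≠ k := by
          intro hEq
          apply hjp
          rw [← hEq, hord2, Int.toNat_natCast]
        have : ((pvInv j).toNat < k + 1) ↔ ((pvInv j).toNat < k) := by omega
        simp [this]
  | none =>
    have hn : array[k]? = none := by rwa [PySem.List.pyGet?_natCast] at h
    have hklen : array.length ≤ k := List.getElem?_eq_none_iff.mp hn
    apply List.ext_getElem
    · simp [stateAt]
    · intro j hj hj2
      have hj48 : j < 48 := by simpa [stateAt] using hj2
      simp only [stateAt, List.getElem_map, List.getElem_range]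
      obtain ⟨hnn2, hlt2, hord2⟩ := pvF2 j hj48
      congr 1
      simp only [eq_iff_iff]
      constructor
      · rintro ⟨h1, h2⟩; exact ⟨by omega, h2⟩
      · rintro ⟨h1, h2⟩
        refine ⟨?_, h2⟩
        have : (pvInv j).toNat < array.length := by omega
        omega

lemma loop_stateAt (array : List (Int × Int × Int)) :
    ∀ (m k : Nat), k + m = 48 →
    (List.range' k m).foldl
      (fun out (i : Nat) =>
        match PySem.List.pyGet? array (i : Int) with
        | some v => out.set (ordL.getD i 0).toNat v
        | none => out)
      (stateAt array k) = stateAt array 48 := by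
  intro m
  induction m with
  | zero =>
    intro k hk
    have hk48 : k = 48 := by omega
    subst hk48
    simp only [List.range'_zero, List.foldl_nil]
  | succ n ih =>
    intro k hk
    rw [List.range'_succ, List.foldl_cons, step_stateAt array k (by omega)]
    exact ih (k + 1) (by omega)

lemma stateAt_zero (array : List (Int × Int × Int)) :
    List.replicate 48 pvD = stateAt array 0 := by
  apply List.ext_getElem
  · simp [stateAt]
  · intro j h1 h2
    simp [stateAt]

theorem maplights_eq (array : List (Int × Int × Int)) :
    maplights array = maplights_alt array := by
  have h1 : maplights array = stateAt array 48 := by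
    unfold maplights
    rw [ordL_length, List.range_eq_range']
    rw [show (List.replicate 48 ((0:Int),(0:Int),(0:Int))) = stateAt array 0 from stateAt_zero array]
    exact loop_stateAt array 48 0 rfl
  rw [h1]
  unfold maplights_alt stateAt
  rw [ordL_length]
  apply List.map_congr_left
  intro j hj
  rw [List.mem_range] at hj
  obtain ⟨hnn, hlt, _⟩ := pvF2 j hj
  show (if (pvInv j).toNat < 48 ∧ pvInv j < (array.length : Int) then array[(pvInv j).toNat]! else pvD)
      = (let i := (invD.get? (j : Int)).getD 0;
         if i < (array.length : Int) then array[i.toNat]! else ((0 : Int), (0 : Int), (0 : Int)))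
  by_cases hc : pvInv j < (array.length : Int)
  · rw [if_pos ⟨hlt, hc⟩]
    simp only [pvInv] at hc ⊢
    rw [if_pos hc]
  · rw [if_neg (by tauto)]
    simp only [pvInv] at hc ⊢
    rw [if_neg hc]
    rfl

-- ===== VERDICT (by name: the statement is the Claim_ definition above) =====
theorem maplights_spec : Claim_equal_maplights := by
  intro array _
  unfold Spec_maplights
  exact maplights_eq array
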